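-- pv_equiv track=rewrite | github.com/nmlorg/ntelebot | ntelebot/keyboardutil.py | shorten_lines
-- ===== SOURCE A (Python) =====
-- def shorten_lines(lines, maxlen):
--     """Generate a list of shared prefixes and a map of long string -> encoded string."""
--
--     prefixes = []
--     mapping = {}
--     for line in sorted(lines, key=lambda line: -len(line)):
--         if len(line) <= maxlen:
--             # This could be moved into the else: below to minimize overall payload size, but leaving
--             # lines that are already within the limit as is allows more buttons to remain functional
--             # if a message's entities section is ever trimmed.
--             break
--         for i, prefix in enumerate(prefixes):
--             if line.startswith(prefix):
--                 break
--         else: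
--             i = len(prefixes)
--             prefixcode = '\0%i\0' % i
--             # The new prefix will be as small as possible so the remaining line--including the
--             # encoded prefix number--is exactly maxlen bytes long. This should guarantee the maximum
--             # possible reuse between lines.
--             prefix = line[:-(maxlen - len(prefixcode))]
--             prefixes.append(prefix)
--         mapping[line] = '\0%i\0%s' % (i, line[len(prefix):])
--     return prefixes, mapping
-- ===== SOURCE B (Python) =====
-- def shorten_lines(lines, maxlen):
--     """Generate a list of shared prefixes and a map of long string -> encoded string."""
--
--     shared = []
--     bylen = {}  # prefix length -> {prefix: its index in shared}
--     encoded = {}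
--     # Since the lines are visited in order of decreasing length, every line after the
--     # first short one is short too, so skipping them is the same as stopping there.
--     for line in sorted(lines, key=lambda s: -len(s)):
--         if len(line) > maxlen:
--             # A stored prefix matches the line iff it equals the line's own prefix of the
--             # same length, so probe one hash per stored prefix length and take the hit
--             # with the lowest index instead of scanning the prefix list front to back.
--             hits = [(d[line[:n]], n) for n, d in bylen.items() if line[:n] in d]
--             if hits:
--                 i, n = min(hits)
--             else:
--                 i = len(shared)
--                 prefix = line[:-(maxlen - len('\0%i\0' % i))]
--                 n = len(prefix)
--                 shared.append(prefix)
--                 bylen.setdefault(n, {})[prefix] = i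
--             encoded[line] = '\0%i\0' % i + line[n:]
--     return shared, encoded
-- ===== Notes on version B (the rewrite author's own statement) =====
-- stated objective: alternative
-- what changed: Replaced A's front-to-back scan of the stored-prefix list per line by a dict keyed by prefix length (one hash probe per stored length, lowest stored index wins), and replaced A's break-terminated loop by a uniform fold that skips short lines, which is equivalent because the lines are visited in decreasing length order.
import Mathlib
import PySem

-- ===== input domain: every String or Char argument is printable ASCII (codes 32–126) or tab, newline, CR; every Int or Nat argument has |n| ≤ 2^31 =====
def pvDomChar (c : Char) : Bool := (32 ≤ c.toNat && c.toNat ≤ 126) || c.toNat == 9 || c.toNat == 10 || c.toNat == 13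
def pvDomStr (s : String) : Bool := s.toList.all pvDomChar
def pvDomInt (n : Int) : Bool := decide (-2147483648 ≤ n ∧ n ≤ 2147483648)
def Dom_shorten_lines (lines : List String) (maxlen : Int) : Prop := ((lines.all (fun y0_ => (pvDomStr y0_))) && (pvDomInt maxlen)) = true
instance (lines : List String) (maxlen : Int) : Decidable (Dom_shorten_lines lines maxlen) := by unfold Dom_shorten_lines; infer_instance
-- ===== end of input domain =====

-- B replaces A's front-to-back scan of the stored-prefix list by a dict keyed by prefix
-- LENGTH (one hash probe per stored length, lowest index wins) and replaces A's
-- break-terminated loop by a filtered fold over the sorted lines (alternative algorithm).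

-- ===== PORT A =====
-- '\0%i\0' % i
def pvCodeA (i : Int) : List Char := '\x00' :: (PySem.Int.toChars i ++ ['\x00'])

-- 'for i, prefix in enumerate(prefixes): if line.startswith(prefix): break' (none = the for's else:)
def pvFindA (cs : List Char) : List (List Char) → Int → Option (Int × List Char)
  | [], _ => none
  | p :: rest, i => if PySem.Chars.startswith cs p then some (i, p) else pvFindA cs rest (i + 1)

def pvLoopA (maxlen : Int) : List String → List (List Char) → PySem.Dict String String → List (List Char) × PySem.Dict String String
  | [], ps, m => (ps, m)
  | line :: rest, ps, m =>
    let cs := line.toList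
    if PySem.Str.len line ≤ maxlen then (ps, m)
    else
      match pvFindA cs ps 0 with
      | some (i, p) =>
          pvLoopA maxlen rest ps (m.insert line (String.ofList (pvCodeA i ++ PySem.List.slice cs (some ((p.length : Int))) none)))
      | none =>
          let i : Int := (ps.length : Int)
          let code := pvCodeA i
          let p := PySem.List.slice cs none (some (-(maxlen - (code.length : Int))))
          pvLoopA maxlen rest (ps ++ [p]) (m.insert line (String.ofList (code ++ PySem.List.slice cs (some ((p.length : Int))) none)))

def shorten_lines (lines : List String) (maxlen : Int) : List String × (List (String × String)) :=
  let st := pvLoopA maxlen (PySem.List.sorted lines (fun line => -(PySem.Str.len line)) false) [] PySem.Dict.empty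
  (st.1.map String.ofList, st.2.items)

-- ===== PORT B =====
-- B's loop state: the shared prefixes, the length-keyed prefix index, the encoded map
structure PvBSt where
  shared : List (List Char)
  bylen : PySem.Dict Int (PySem.Dict String Int)
  enc : PySem.Dict String String

-- '\0%i\0' % i
def pvCodeB (i : Int) : List Char := ['\x00'] ++ PySem.Int.toChars i ++ ['\x00']

-- hits = [(d[line[:n]], n) for n, d in bylen.items() if line[:n] in d]
def pvHits (bylen : PySem.Dict Int (PySem.Dict String Int)) (cs : List Char) : List (Int × Int) :=
  bylen.items.filterMap (fun p =>
    (p.2.get? (String.ofList (PySem.List.slice cs none (some p.1)))).map (fun i => (i, p.1)))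

-- one iteration of B's 'for line in sorted(...)' body
def pvStepB (maxlen : Int) (st : PvBSt) (line : String) : PvBSt :=
  if maxlen < PySem.Str.len line then
    let cs := line.toList
    match PySem.List.min2? (pvHits st.bylen cs) Prod.fst Prod.snd with
    | some hit =>
        { st with enc := st.enc.insert line (String.ofList (pvCodeB hit.1 ++ PySem.List.slice cs (some hit.2) none)) }
    | none =>
        let i : Int := (st.shared.length : Int)
        let p := PySem.List.slice cs none (some (-(maxlen - ((pvCodeB i).length : Int))))
        let n : Int := (p.length : Int)
        { shared := st.shared ++ [p],
          bylen := st.bylen.modify n PySem.Dict.empty (fun d => d.insert (String.ofList p) i),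
          enc := st.enc.insert line (String.ofList (pvCodeB i ++ PySem.List.slice cs (some n) none)) }
  else st

def shorten_lines_alt (lines : List String) (maxlen : Int) : List String × (List (String × String)) :=
  let st := (PySem.List.sorted lines (fun s => -(PySem.Str.len s)) false).foldl (pvStepB maxlen) ⟨[], PySem.Dict.empty, PySem.Dict.empty⟩
  (st.shared.map String.ofList, st.enc.items)

-- ===== PRECONDITION & SPEC =====
def Spec_shorten_lines (lines : List String) (maxlen : Int) (out : List String × (List (String × String))) : Prop := out = shorten_lines_alt lines maxlen
instance (lines : List String) (maxlen : Int) (out : List String × (List (String × String))) : Decidable (Spec_shorten_lines lines maxlen out) := by unfold Spec_shorten_lines; infer_instance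

-- ===== CLAIM (what is proved, stated in full; the proofs are below) =====
def Claim_equal_shorten_lines : Prop := ∀ (lines : List String) (maxlen : Int), Dom_shorten_lines lines maxlen → Spec_shorten_lines lines maxlen (shorten_lines lines maxlen)

-- ===== LEMMAS AND PROOFS =====

-- position of the first occurrence of p in ps (the value B's inner dicts store)
def pvPos (p : List Char) : List (List Char) → Option Nat
  | [] => none
  | q :: rest => if q = p then some 0 else (pvPos p rest).map (· + 1)

-- the double lookup bylen[n][s]
def pvLook (bl : PySem.Dict Int (PySem.Dict String Int)) (n : Int) (s : String) : Option Int :=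
  (bl.get? n).bind (fun d => d.get? s)

-- the invariant tying B's length-keyed index to A's prefix list
def pvInv (ps : List (List Char)) (bl : PySem.Dict Int (PySem.Dict String Int)) : Prop :=
  ps.Nodup ∧ bl.keys.Nodup ∧
  ∀ (n : Int) (s : String),
    pvLook bl n s = if (s.toList.length : Int) = n then (pvPos s.toList ps).map (fun m : Nat => (m : Int)) else none

theorem pvCode_eq (i : Int) : pvCodeB i = pvCodeA i := rfl

theorem pvPos_getElem {p : List Char} {ps : List (List Char)} {n : Nat}
    (h : pvPos p ps = some n) : ps[n]? = some p := by
  induction ps generalizing n with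
  | nil => simp [pvPos] at h
  | cons q rest ih =>
    by_cases hq : q = p
    · simp [pvPos, hq] at h; subst h; simp [hq]
    · simp [pvPos, hq] at h
      obtain ⟨m, hm, rfl⟩ := h
      simpa using ih hm

theorem pvPos_of_getElem {p : List Char} {ps : List (List Char)} {n : Nat}
    (hnd : ps.Nodup) (h : ps[n]? = some p) : pvPos p ps = some n := by
  induction ps generalizing n with
  | nil => simp at h
  | cons q rest ih =>
    cases n with
    | zero => simp at h; simp [pvPos, h]
    | succ m =>
      simp at h
      have hmem : p ∈ rest := List.mem_of_getElem? h
      have hq : q ≠ p := by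
        rintro rfl; exact (List.nodup_cons.mp hnd).1 hmem
      simp [pvPos, hq, ih (List.nodup_cons.mp hnd).2 h]

theorem pvPos_append {q p : List Char} {ps : List (List Char)} :
    pvPos q (ps ++ [p]) =
      match pvPos q ps with
      | some n => some n
      | none => if p = q then some ps.length else none := by
  induction ps with
  | nil => simp [pvPos]
  | cons r rest ih =>
    by_cases hr : r = q
    · simp [pvPos, hr]
    · simp only [List.cons_append, pvPos, if_neg hr, ih]
      cases hpos : pvPos q rest
      · simp only [Option.map_none]
        split <;> simp
      · simp

-- membership in B's hits list, under the invariant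
theorem mem_pvHits {ps : List (List Char)} {bl : PySem.Dict Int (PySem.Dict String Int)}
    (hinv : pvInv ps bl) (cs : List Char) (x : Int × Int) :
    x ∈ pvHits bl cs ↔ ∃ (m k : Nat), k ≤ cs.length ∧ pvPos (cs.take k) ps = some m ∧ x = ((m : Int), (k : Int)) := by
  obtain ⟨hnd, hbk, hlook⟩ := hinv
  unfold pvHits
  rw [List.mem_filterMap]
  constructor
  · rintro ⟨⟨n, d⟩, hp, hf⟩
    rw [Option.map_eq_some_iff] at hf
    obtain ⟨i, hi, hx⟩ := hf
    have hget : bl.get? n = some d := PySem.Dict.get?_of_mem_items bl hp hbk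
    have hl : pvLook bl n (String.ofList (PySem.List.slice cs none (some n))) = some i := by
      simp [pvLook, hget, hi]
    rw [hlook] at hl
    split at hl
    · rename_i hcond
      simp only [String.toList_ofList] at hcond hl
      have hn0 : 0 ≤ n := by
        have := (PySem.List.slice cs none (some n)).length
        omega
      have hsl : PySem.List.slice cs none (some n) = cs.take n.toNat := PySem.List.slice_to cs hn0
      rw [hsl] at hcond hl
      have hklen : n.toNat ≤ cs.length := by
        rw [List.length_take] at hcond
        omega
      rw [Option.map_eq_some_iff] at hl
      obtain ⟨mm, hm, him⟩ := hl
      refine ⟨mm, n.toNat, hklen, hm, ?_⟩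
      rw [← hx, ← him]
      simp
      omega
    · simp at hl
  · rintro ⟨m, k, hk, hpos, rfl⟩
    have hl : pvLook bl (k : Int) (String.ofList (cs.take k)) = some (m : Int) := by
      rw [hlook]
      simp only [String.toList_ofList]
      rw [List.length_take, if_pos (by omega), hpos]
      rfl
    obtain ⟨d, hd, hds⟩ : ∃ d, bl.get? (k : Int) = some d ∧ d.get? (String.ofList (cs.take k)) = some (m : Int) := by
      unfold pvLook at hl
      cases hg : bl.get? (k : Int) with
      | none => rw [hg] at hl; simp at hl
      | some d => rw [hg] at hl; exact ⟨d, rfl, hl⟩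
    refine ⟨((k : Int), d), (PySem.Dict.get?_eq_some_iff_mem_items bl _ d hbk).mp hd, ?_⟩
    simp only [PySem.List.slice_to_natCast, hds]
    rfl


-- min2? of a list with a unique strict minimum in the first component
def pvMinStep : Option (Int × Int) → (Int × Int) → Option (Int × Int) :=
  fun acc x =>
      match acc with
      | none => some x
      | some m =>
        if (decide (x.1 < m.1) || !decide (m.1 < x.1) && decide (x.2 < m.2)) = true then some x else some m

theorem pvMin2?_eq_foldl (xs : List (Int × Int)) :
    PySem.List.min2? xs Prod.fst Prod.snd = xs.foldl pvMinStep none := by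
  unfold PySem.List.min2?
  congr 1
  funext acc x
  cases acc <;> rfl

theorem pvMinAux (w : Int × Int) : ∀ (xs : List (Int × Int)) (m : Int × Int),
    (∀ y ∈ xs, y = w ∨ w.1 < y.1) → (m = w ∨ (w.1 < m.1 ∧ w ∈ xs)) →
    xs.foldl pvMinStep (some m) = some w := by
  intro xs
  induction xs with
  | nil =>
    intro m _ hm
    rcases hm with rfl | ⟨_, hw⟩
    · rfl
    · simp at hw
  | cons x rest ih =>
    intro m hall hm
    simp only [List.foldl_cons]
    rcases hm with rfl | ⟨hlt, hw⟩
    · have hstay : pvMinStep (some m) x = some m := by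
        rcases hall x (by simp) with h | h
        · subst h; simp [pvMinStep]
        · simp [pvMinStep]; omega
      rw [hstay]
      exact ih m (fun y hy => hall y (by simp [hy])) (Or.inl rfl)
    · by_cases hxw : x = w
      · subst hxw
        have : pvMinStep (some m) x = some x := by simp [pvMinStep]; omega
        rw [this]
        exact ih x (fun y hy => hall y (by simp [hy])) (Or.inl rfl)
      · have hw' : w ∈ rest := by
          rcases List.mem_cons.mp hw with h | h
          · exact absurd h.symm hxw
          · exact h
        have hx' : w.1 < x.1 := by
          rcases hall x (by simp) with h | h
          · exact absurd h hxw
          · exact h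
        by_cases hc : (decide (x.1 < m.1) || !decide (m.1 < x.1) && decide (x.2 < m.2)) = true
        · have : pvMinStep (some m) x = some x := by simp only [pvMinStep]; rw [if_pos hc]
          rw [this]
          exact ih x (fun y hy => hall y (by simp [hy])) (Or.inr ⟨hx', hw'⟩)
        · have : pvMinStep (some m) x = some m := by simp only [pvMinStep]; rw [if_neg hc]
          rw [this]
          exact ih m (fun y hy => hall y (by simp [hy])) (Or.inr ⟨hlt, hw'⟩)

theorem min2?_eq_of_strict (xs : List (Int × Int)) (w : Int × Int) (hw : w ∈ xs)
    (hmin : ∀ y ∈ xs, y = w ∨ w.1 < y.1) :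
    PySem.List.min2? xs Prod.fst Prod.snd = some w := by
  rw [pvMin2?_eq_foldl]
  cases xs with
  | nil => simp at hw
  | cons x rest =>
    simp only [List.foldl_cons]
    have hx0 : pvMinStep none x = some x := rfl
    rw [hx0]
    by_cases hxw : x = w
    · subst hxw
      exact pvMinAux x rest x (fun y hy => hmin y (by simp [hy])) (Or.inl rfl)
    · have hx' : w.1 < x.1 := by
        rcases hmin x (by simp) with h | h
        · exact absurd h hxw
        · exact h
      have hw' : w ∈ rest := by
        rcases List.mem_cons.mp hw with h | h
        · exact absurd h.symm hxw
        · exact h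
      exact pvMinAux w rest x (fun y hy => hmin y (by simp [hy])) (Or.inr ⟨hx', hw'⟩)

-- A-side characterisation of the enumerate/startswith/break scan
theorem pvFindA_none_iff (cs : List Char) (ps : List (List Char)) (i : Int) :
    pvFindA cs ps i = none ↔ ∀ p ∈ ps, PySem.Chars.startswith cs p = false := by
  induction ps generalizing i with
  | nil => simp [pvFindA]
  | cons p rest ih =>
    by_cases hp : PySem.Chars.startswith cs p
    · simp [pvFindA, hp]
    · have hp' : PySem.Chars.startswith cs p = false := by simpa using hp
      simp only [pvFindA, if_neg hp, ih, List.mem_cons]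
      constructor
      · rintro h q (rfl | hq)
        · exact hp'
        · exact h q hq
      · intro h q hq
        exact h q (Or.inr hq)

theorem pvFindA_some (cs : List Char) (ps : List (List Char)) (i : Int) (r : Int × List Char)
    (h : pvFindA cs ps i = some r) :
    ∃ n : Nat, r.1 = i + n ∧ ps[n]? = some r.2 ∧ PySem.Chars.startswith cs r.2 = true ∧
      ∀ m < n, ∀ q, ps[m]? = some q → PySem.Chars.startswith cs q = false := by
  induction ps generalizing i with
  | nil => simp [pvFindA] at h
  | cons p rest ih =>
    by_cases hp : PySem.Chars.startswith cs p
    · simp [pvFindA, hp] at h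
      refine ⟨0, by simp [← h], by simp [← h], by simp [← h, hp], by simp⟩
    · simp [pvFindA, hp] at h
      obtain ⟨n, hn1, hn2, hn3, hn4⟩ := ih (i + 1) h
      refine ⟨n + 1, by omega, by simpa using hn2, hn3, ?_⟩
      intro m hm q hq
      cases m with
      | zero => simp at hq; subst hq; simpa using hp
      | succ m' => simp at hq; exact hn4 m' (by omega) q hq

-- the key step: under the invariant, B's lowest-index hash hit is A's first scan match
theorem inner_eq (cs : List Char) (ps : List (List Char)) (bl : PySem.Dict Int (PySem.Dict String Int))
    (hinv : pvInv ps bl) :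
    PySem.List.min2? (pvHits bl cs) Prod.fst Prod.snd =
      (pvFindA cs ps 0).map (fun r => (r.1, (r.2.length : Int))) := by
  cases hfa : pvFindA cs ps 0 with
  | none =>
    have hempty : pvHits bl cs = [] := by
      rw [List.eq_nil_iff_forall_not_mem]
      intro x hx
      obtain ⟨m, k, hk, hpos, rfl⟩ := (mem_pvHits hinv cs x).mp hx
      have hmem : cs.take k ∈ ps := List.mem_of_getElem? (pvPos_getElem hpos)
      have hpre : PySem.Chars.startswith cs (cs.take k) = true :=
        (PySem.Chars.startswith_iff _ _).mpr (List.take_prefix _ _)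
      have := (pvFindA_none_iff cs ps 0).mp hfa _ hmem
      simp [this] at hpre
    rw [hempty]
    rfl
  | some r =>
    obtain ⟨n, hr1, hr2, hr3, hr4⟩ := pvFindA_some cs ps 0 r hfa
    have hpre : r.2 <+: cs := (PySem.Chars.startswith_iff _ _).mp hr3
    have hlen : r.2.length ≤ cs.length := hpre.length_le
    have htake : cs.take r.2.length = r.2 := (List.prefix_iff_eq_take.mp hpre).symm
    have hwmem : ((n : Int), (r.2.length : Int)) ∈ pvHits bl cs :=
      (mem_pvHits hinv cs _).mpr ⟨n, r.2.length, hlen, by rw [htake]; exact pvPos_of_getElem hinv.1 hr2, rfl⟩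
    have hmin : ∀ y ∈ pvHits bl cs, y = ((n : Int), (r.2.length : Int)) ∨ ((n : Int), (r.2.length : Int)).1 < y.1 := by
      intro y hy
      obtain ⟨m, k, hk, hpos, rfl⟩ := (mem_pvHits hinv cs y).mp hy
      have hgm := pvPos_getElem hpos
      have hsw : PySem.Chars.startswith cs (cs.take k) = true :=
        (PySem.Chars.startswith_iff _ _).mpr (List.take_prefix _ _)
      have hnm : n ≤ m := by
        by_contra hlt
        have := hr4 m (by omega) _ hgm
        simp [this] at hsw
      rcases Nat.eq_or_lt_of_le hnm with heq | hlt
      · left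
        rw [← heq, hr2] at hgm
        have ht : cs.take k = r.2 := (Option.some_inj.mp hgm).symm
        have hkl : k = r.2.length := by
          rw [← ht, List.length_take]
          omega
        rw [← heq, hkl]
      · right
        simp only []
        exact_mod_cast hlt
    rw [min2?_eq_of_strict _ _ hwmem hmin]
    simp only [Option.map_some]
    rw [hr1]
    norm_num


-- invariant preservation when a new prefix is stored
theorem pvInv_store (ps : List (List Char)) (bl : PySem.Dict Int (PySem.Dict String Int)) (p : List Char)
    (hinv : pvInv ps bl) (hnp : p ∉ ps) :
    pvInv (ps ++ [p]) (bl.modify ((p.length : Int)) PySem.Dict.empty (fun d => d.insert (String.ofList p) ((ps.length : Int)))) := by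
  obtain ⟨hnd, hbk, hlook⟩ := hinv
  refine ⟨?_, ?_, ?_⟩
  · simp only [List.nodup_append, List.nodup_singleton, true_and]
    refine ⟨hnd, ?_⟩
    intro a ha b hb
    simp at hb
    subst hb
    exact fun h => hnp (h ▸ ha)
  · exact PySem.Dict.nodup_keys_insert _ _ _ hbk
  · intro n' s
    have hposn : pvPos p ps = none := by
      cases hpos : pvPos p ps with
      | none => rfl
      | some m => exact absurd (List.mem_of_getElem? (pvPos_getElem hpos)) hnp
    unfold pvLook
    unfold PySem.Dict.modify
    rw [PySem.Dict.get?_insert]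
    by_cases hn : n' = ((p.length : Int))
    · rw [if_pos hn]
      simp only [Option.bind_some]
      rw [PySem.Dict.get?_insert]
      by_cases hs : s = String.ofList p
      · subst hs
        rw [if_pos rfl, hn]
        simp only [String.toList_ofList]
        rw [pvPos_append, hposn]
        simp
      · rw [if_neg hs]
        have hold := hlook n' s
        unfold pvLook at hold
        have hgd : (bl.getD ((p.length : Int)) PySem.Dict.empty).get? s = (bl.get? n').bind (fun d => d.get? s) := by
          rw [PySem.Dict.getD_eq_get?_getD, ← hn]
          cases bl.get? n' with
          | none => simp [PySem.Dict.get?_empty]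
          | some d => simp
        rw [hgd, hold]
        have hps : p ≠ s.toList := by
          intro h
          exact hs (by rw [← String.ofList_toList (s := s), ← h])
        rw [pvPos_append]
        cases hpos : pvPos s.toList ps with
        | some m => simp
        | none => simp [hps]
    · rw [if_neg hn]
      have hold := hlook n' s
      unfold pvLook at hold
      rw [hold, pvPos_append]
      by_cases hc : (s.toList.length : Int) = n'
      · have hps : p ≠ s.toList := by
          intro h
          apply hn
          rw [← hc, h]
        simp only [if_pos hc]
        cases hpos : pvPos s.toList ps with
        | some m => rfl
        | none => simp [hps]
      · simp only [if_neg hc]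


-- a freshly created prefix is a take of the line
theorem slice_none_is_take (cs : List Char) (e : Int) :
    ∃ t, PySem.List.slice cs none (some e) = cs.take t := by
  by_cases he : 0 ≤ e
  · exact ⟨e.toNat, PySem.List.slice_to _ he⟩
  · obtain ⟨k, hk, rfl⟩ : ∃ k : Nat, 0 < k ∧ e = -((k : Int)) :=
      ⟨(-e).toNat, by omega, by omega⟩
    exact ⟨cs.length - k, PySem.List.slice_to_neg_natCast _ _ hk⟩

-- once the lines are short, B's fold does nothing
theorem foldl_stepB_skip (maxlen : Int) (ls : List String) (st : PvBSt)
    (h : ∀ l ∈ ls, PySem.Str.len l ≤ maxlen) :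
    ls.foldl (pvStepB maxlen) st = st := by
  induction ls generalizing st with
  | nil => rfl
  | cons l rest ih =>
    have hl : ¬ maxlen < PySem.Str.len l := by
      have := h l (by simp); omega
    simp only [List.foldl_cons, pvStepB, if_neg hl]
    exact ih st (fun x hx => h x (by simp [hx]))

-- the outer loops agree, carrying the invariant
theorem loopAB (maxlen : Int) : ∀ (ls : List String) (ps : List (List Char))
    (bl : PySem.Dict Int (PySem.Dict String Int)) (m : PySem.Dict String String), pvInv ps bl →
    ls.Pairwise (fun a b => -(PySem.Str.len a) ≤ -(PySem.Str.len b)) →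
    (ls.foldl (pvStepB maxlen) ⟨ps, bl, m⟩).shared = (pvLoopA maxlen ls ps m).1 ∧
    (ls.foldl (pvStepB maxlen) ⟨ps, bl, m⟩).enc = (pvLoopA maxlen ls ps m).2 := by
  intro ls
  induction ls with
  | nil => intro ps bl m _ _; exact ⟨rfl, rfl⟩
  | cons line rest ih =>
    intro ps bl m hinv hpw
    obtain ⟨hhead, htail⟩ := List.pairwise_cons.mp hpw
    by_cases hbr : PySem.Str.len line ≤ maxlen
    · have hskip : ∀ l ∈ (line :: rest), PySem.Str.len l ≤ maxlen := by
        intro l hl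
        rcases List.mem_cons.mp hl with rfl | hl
        · exact hbr
        · have := hhead l hl; omega
      rw [foldl_stepB_skip maxlen _ _ hskip]
      simp only [pvLoopA, if_pos hbr]
      exact ⟨trivial, trivial⟩
    · have hlt : maxlen < PySem.Str.len line := by omega
      have hM := inner_eq line.toList ps bl hinv
      simp only [List.foldl_cons]
      cases hfa : pvFindA line.toList ps 0 with
      | some r =>
        rw [hfa] at hM
        simp only [pvLoopA, if_neg hbr, hfa]
        have hstep : pvStepB maxlen ⟨ps, bl, m⟩ line =
            ⟨ps, bl, m.insert line (String.ofList (pvCodeA r.1 ++ PySem.List.slice line.toList (some ((r.2.length : Int))) none))⟩ := by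
          simp only [pvStepB, if_pos hlt, hM, Option.map_some, pvCode_eq]
        rw [hstep]
        exact ih ps bl _ hinv htail
      | none =>
        rw [hfa] at hM
        simp only [pvLoopA, if_neg hbr, hfa]
        have hstep : pvStepB maxlen ⟨ps, bl, m⟩ line =
            ⟨ps ++ [PySem.List.slice line.toList none (some (-(maxlen - ((pvCodeA ((ps.length : Int))).length : Int))))],
             bl.modify (((PySem.List.slice line.toList none (some (-(maxlen - ((pvCodeA ((ps.length : Int))).length : Int))))).length : Int)) PySem.Dict.empty
               (fun d => d.insert (String.ofList (PySem.List.slice line.toList none (some (-(maxlen - ((pvCodeA ((ps.length : Int))).length : Int)))))) ((ps.length : Int))),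
             m.insert line (String.ofList (pvCodeA ((ps.length : Int)) ++ PySem.List.slice line.toList (some (((PySem.List.slice line.toList none (some (-(maxlen - ((pvCodeA ((ps.length : Int))).length : Int))))).length : Int))) none))⟩ := by
          simp only [pvStepB, if_pos hlt, hM, Option.map_none, pvCode_eq]
        rw [hstep]
        have hnp : PySem.List.slice line.toList none (some (-(maxlen - ((pvCodeA ((ps.length : Int))).length : Int)))) ∉ ps := by
          intro hmem
          obtain ⟨t, ht⟩ := slice_none_is_take line.toList (-(maxlen - ((pvCodeA ((ps.length : Int))).length : Int)))
          have hpre : PySem.Chars.startswith line.toList (List.take t line.toList) = true :=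
            (PySem.Chars.startswith_iff _ _).mpr (List.take_prefix _ _)
          rw [← ht] at hpre
          rw [(pvFindA_none_iff line.toList ps 0).mp hfa _ hmem] at hpre
          simp at hpre
        exact ih _ _ _ (pvInv_store ps bl _ hinv hnp) htail


-- ===== VERDICT (by name: the statement is the Claim_ definition above) =====
theorem shorten_lines_spec : Claim_equal_shorten_lines := by
  intro lines maxlen _
  unfold Spec_shorten_lines shorten_lines shorten_lines_alt
  have hinv : pvInv [] PySem.Dict.empty := by
    refine ⟨List.nodup_nil, by simp [PySem.Dict.keys_empty], ?_⟩
    intro n s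
    simp [pvLook, PySem.Dict.get?_empty, pvPos]
  have h := loopAB maxlen (PySem.List.sorted lines (fun s => -(PySem.Str.len s)) false)
    [] PySem.Dict.empty PySem.Dict.empty hinv
    (PySem.List.sorted_pairwise lines (fun s => -(PySem.Str.len s)))
  simp only [h.1, h.2]
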